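-- pv_equiv track=rewrite | github.com/isilanes/myeuler | p346/p346.py | f0
-- ===== SOURCE A (Python) =====
-- def f0(n=None):
--
--     def repunit(base, r):
--         """Return decimal representation of r-digit repunit in base 'base'."""
--
--         return sum([base**i for i in range(r)])
--
--     repunit_count = {}
--     for base in range(2, n+1):
--         r = 2
--         while True:
--             ru = repunit(base, r)
--             if ru > n:
--                 break
--
--             repunit_count[ru] = repunit_count.get(ru, 0) + 1
--             r += 1
--
--     return sum([x for x, y in repunit_count.items() if y > 1]) + 1
-- ===== SOURCE B (Python) =====
-- def f0(n=None):
--     # Every repunit value m (length>=2) is the length-2 repunit of base m-1, so a value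
--     # is a repunit in more than one (base, length) pair iff it is a repunit of length at least three
--     # in some base b, which forces b*b+b+1 <= n.  Collect those values only.
--     seen = set()
--     b = 2
--     while b * b + b + 1 <= n:
--         v = b * b + b + 1
--         p = b * b
--         while v <= n:
--             seen.add(v)
--             p = p * b
--             v = v + p
--         b += 1
--     return sum(seen) + 1
-- ===== Notes on version B (the rewrite author's own statement) =====
-- stated objective: faster
-- what changed: B drops the O(n) sweep over all bases with a dict counter: a value is repeated iff it is a repunit of length at least three in some base, so B enumerates only bases up to about sqrt(n), builds each repunit incrementally (Horner-style) into a set, and sums the set.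
import Mathlib
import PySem

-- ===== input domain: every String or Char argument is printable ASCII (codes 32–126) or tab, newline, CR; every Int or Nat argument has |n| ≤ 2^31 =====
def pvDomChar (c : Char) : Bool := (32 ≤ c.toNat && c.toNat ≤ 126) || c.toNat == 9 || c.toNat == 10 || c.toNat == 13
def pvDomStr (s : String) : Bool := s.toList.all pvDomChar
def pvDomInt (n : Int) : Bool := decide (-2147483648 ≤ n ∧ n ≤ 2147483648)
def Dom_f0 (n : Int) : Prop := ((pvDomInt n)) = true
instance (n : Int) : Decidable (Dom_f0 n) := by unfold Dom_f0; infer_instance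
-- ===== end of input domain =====

-- B collects only the longer (length at least three) repunits (bases b with b*b+b+1 ≤ n, value built
-- incrementally) into a set and sums it, instead of A's sweep over every base 2..n
-- with a dict counter; objective: faster.

-- ===== PORT A =====
-- helper 'repunit(base, r)': sum([base**i for i in range(r)])

def repunitA (base r : Int) : Int :=
  ((PySem.List.pyRange 0 r 1).map (fun i => base ^ i.toNat)).sum

theorem repunitA_succ (b r : Int) (hr : 0 ≤ r) :
    repunitA b (r + 1) = repunitA b r + b ^ r.toNat := by
  unfold repunitA; rw [PySem.List.pyRange_one_succ_right hr]; simp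

theorem repunitA_succ_lt (b r : Int) (hb : 2 ≤ b) (hr : 0 ≤ r) :
    repunitA b r < repunitA b (r + 1) := by
  rw [repunitA_succ b r hr]
  have : (1 : Int) ≤ b ^ r.toNat := one_le_pow₀ (by omega)
  omega

-- the inner 'while True: ru = repunit(base, r); if ru > n: break; d[ru] = d.get(ru, 0) + 1; r += 1'.
-- The '2 ≤ base ∧ 0 ≤ r' test only makes the recursion well-founded; every call site
-- (base from range(2, n+1), r starting at 2) satisfies it, so it never alters the result.
-- 'repunit_count' is ported as Std.HashMap (a hash table, like Python's dict): its items
-- are consumed only by the order-independent filtered sum below, so the insertion order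
-- PySem.Dict would additionally track is never observable in the result.

def loopA (n base r : Int) (d : Std.HashMap Int Int) : Std.HashMap Int Int :=
  if n < repunitA base r then d
  else if h : 2 ≤ base ∧ 0 ≤ r then
    loopA n base (r + 1) (d.insert (repunitA base r) (d.getD (repunitA base r) 0 + 1))
  else d
termination_by (n + 1 - repunitA base r).toNat
decreasing_by
  have := repunitA_succ_lt base r h.1 h.2
  omega

def f0 (n : Int) : Int :=
  let d := (PySem.List.pyRange 2 (n + 1) 1).foldl (fun d base => loopA n base 2 d)
    (∅ : Std.HashMap Int Int)
  ((d.toList.filter (fun p => decide (1 < p.2))).map (fun p => p.1)).sum + 1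

-- ===== PORT B =====
-- inner 'while v <= n: seen.add(v); p = p * b; v = v + p'.  The '2 ≤ b ∧ 1 ≤ p' test only
-- makes the recursion well-founded; every call site (b ≥ 2, p = b*b) satisfies it.

def loopBInner (n b v p : Int) (seen : PySem.Set Int) : PySem.Set Int :=
  if n < v then seen
  else if h : 2 ≤ b ∧ 1 ≤ p then
    loopBInner n b (v + p * b) (p * b) (seen.add v)
  else seen
termination_by (n + 1 - v).toNat
decreasing_by
  have : 2 ≤ p * b := by nlinarith [h.1, h.2]
  omega

-- outer 'while b * b + b + 1 <= n: … b += 1'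

def loopBOuter (n b : Int) (seen : PySem.Set Int) : PySem.Set Int :=
  if b * b + b + 1 ≤ n then
    loopBOuter n (b + 1) (loopBInner n b (b * b + b + 1) (b * b) seen)
  else seen
termination_by (n - b).toNat
decreasing_by
  have : 0 ≤ b * b := mul_self_nonneg b
  omega

def f0_alt (n : Int) : Int :=
  (loopBOuter n 2 PySem.Set.empty).sum + 1

-- ===== PRECONDITION & SPEC =====
def Spec_f0 (n : Int) (out : Int) : Prop := out = f0_alt n
instance (n : Int) (out : Int) : Decidable (Spec_f0 n out) := by unfold Spec_f0; infer_instance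

-- ===== CLAIM (what is proved, stated in full; the proofs are below) =====
def Claim_equal_f0 : Prop := ∀ (n : Int), Dom_f0 n → Spec_f0 n (f0 n)

-- ===== LEMMAS AND PROOFS =====
-- genA n b r = the list of decimal values A's inner loop runs through for one base
-- (all repunits of base b, length ≥ r, value ≤ n); B's inner loop runs through the
-- same list for r = 3.

theorem repunitA_lt_of_lt (b r r' : Int) (hb : 2 ≤ b) (hr : 0 ≤ r) (h : r < r') :
    repunitA b r < repunitA b r' := by
  have h1 : r + 1 ≤ r' := h
  clear h
  induction r', h1 using Int.le_induction with
  | base => exact repunitA_succ_lt b r hb hr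
  | succ m hm ih => exact lt_trans ih (repunitA_succ_lt b m hb (by omega))

theorem repunitA_le_of_le (b r r' : Int) (hb : 2 ≤ b) (hr : 0 ≤ r) (h : r ≤ r') :
    repunitA b r ≤ repunitA b r' := by
  rcases eq_or_lt_of_le h with rfl | h
  · exact le_refl _
  · exact le_of_lt (repunitA_lt_of_lt b r r' hb hr h)

theorem repunitA_two (b : Int) : repunitA b 2 = 1 + b := by
  have h : PySem.List.pyRange 0 2 1 = [0, 1] := by decide
  simp [repunitA, h]

theorem repunitA_three (b : Int) : repunitA b 3 = 1 + b + b * b := by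
  have h : PySem.List.pyRange 0 3 1 = [0, 1, 2] := by decide
  simp [repunitA, h]
  ring

def genA (n b r : Int) : List Int :=
  if n < repunitA b r then []
  else if h : 2 ≤ b ∧ 0 ≤ r then repunitA b r :: genA n b (r + 1)
  else []
termination_by (n + 1 - repunitA b r).toNat
decreasing_by
  have := repunitA_succ_lt b r h.1 h.2
  omega

theorem mem_genA (n b r x : Int) (hb : 2 ≤ b) (hr : 0 ≤ r) :
    x ∈ genA n b r ↔ ∃ r', r ≤ r' ∧ x = repunitA b r' ∧ x ≤ n := by
  induction r using genA.induct n b with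
  | case1 r hlt =>
    rw [genA, if_pos hlt]
    simp only [List.not_mem_nil, false_iff]
    rintro ⟨r', hle, rfl, hxn⟩
    have := repunitA_le_of_le b r r' hb hr hle
    omega
  | case2 r hlt h ih =>
    rw [genA, if_neg hlt, dif_pos h]
    simp only [List.mem_cons, ih (by omega)]
    constructor
    · rintro (rfl | ⟨r', hle, rfl, hxn⟩)
      · exact ⟨r, le_refl _, rfl, by omega⟩
      · exact ⟨r', by omega, rfl, hxn⟩
    · rintro ⟨r', hle, rfl, hxn⟩
      rcases eq_or_lt_of_le hle with rfl | hlt'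
      · exact Or.inl rfl
      · exact Or.inr ⟨r', by omega, rfl, hxn⟩
  | case3 r hlt h => exact absurd ⟨hb, hr⟩ h

theorem pairwise_genA (n b r : Int) (hb : 2 ≤ b) (hr : 0 ≤ r) :
    (genA n b r).Pairwise (· < ·) := by
  induction r using genA.induct n b with
  | case1 r hlt => rw [genA, if_pos hlt]; exact List.Pairwise.nil
  | case2 r hlt h ih =>
    rw [genA, if_neg hlt, dif_pos h]
    refine List.Pairwise.cons ?_ (ih (by omega))
    intro y hy
    obtain ⟨r', hle, rfl, -⟩ := (mem_genA n b (r + 1) y hb (by omega)).mp hy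
    exact repunitA_lt_of_lt b r r' hb hr (by omega)
  | case3 r hlt h => rw [genA, if_neg hlt, dif_neg h]; exact List.Pairwise.nil

theorem loopA_eq_foldl (n base r : Int) (d : Std.HashMap Int Int) :
    loopA n base r d =
      (genA n base r).foldl (fun d x => d.insert x (d.getD x 0 + 1)) d := by
  fun_induction loopA n base r d with
  | case1 r d hlt => rw [genA, if_pos hlt]; rfl
  | case2 r d hlt h ih => rw [genA, if_neg hlt, dif_pos h]; exact ih
  | case3 r d hlt h => rw [genA, if_neg hlt, dif_neg h]; rfl

theorem loopBInner_eq_foldl (n b v p : Int) (s : PySem.Set Int) (hb : 2 ≤ b) :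
    ∀ r : Int, 1 ≤ r → v = repunitA b (r + 1) → p = b ^ r.toNat →
      loopBInner n b v p s = (genA n b (r + 1)).foldl PySem.Set.add s := by
  fun_induction loopBInner n b v p s with
  | case1 v p s hlt =>
    rintro r hr rfl rfl
    rw [genA, if_pos hlt]; rfl
  | case2 v p s hlt h ih =>
    rintro r hr rfl rfl
    rw [genA, if_neg hlt, dif_pos ⟨hb, by omega⟩]
    have hv : repunitA b (r + 1) + b ^ r.toNat * b = repunitA b (r + 1 + 1) := by
      rw [repunitA_succ b (r + 1) (by omega)]
      have : (r + 1).toNat = r.toNat + 1 := by omega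
      rw [this, pow_succ]
    have hp : b ^ r.toNat * b = b ^ (r + 1).toNat := by
      have : (r + 1).toNat = r.toNat + 1 := by omega
      rw [this, pow_succ]
    exact ih (r + 1) (by omega) (by rw [hv]) hp
  | case3 v p s hlt h =>
    rintro r hr rfl rfl
    have : (1 : Int) ≤ b ^ r.toNat := one_le_pow₀ (by omega)
    exact absurd ⟨hb, this⟩ h

theorem loopBInner_start (n b : Int) (s : PySem.Set Int) (hb : 2 ≤ b) :
    loopBInner n b (b * b + b + 1) (b * b) s = (genA n b 3).foldl PySem.Set.add s := by
  have h3 : b * b + b + 1 = repunitA b (2 + 1) := by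
    norm_num [repunitA_three]; ring
  have hp : b * b = b ^ (2 : Int).toNat := by
    have : (2 : Int).toNat = 2 := rfl
    rw [this, sq]
  exact loopBInner_eq_foldl n b _ _ s hb 2 (by omega) h3 hp

theorem mem_foldl_add_id (l : List Int) (s : PySem.Set Int) (y : Int) :
    y ∈ l.foldl PySem.Set.add s ↔ y ∈ s ∨ y ∈ l := by
  have := PySem.Set.mem_foldl_add l (fun x => x) s y
  simp only [exists_eq_right'] at this
  simpa using this

theorem nodup_loopBInner (n b v p : Int) (s : PySem.Set Int) (hs : s.Nodup) :
    (loopBInner n b v p s).Nodup := by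
  fun_induction loopBInner n b v p s with
  | case1 v p s hlt => exact hs
  | case2 v p s hlt h ih => exact ih (PySem.Set.nodup_add s v hs)
  | case3 v p s hlt h => exact hs

theorem mem_loopBOuter (n b : Int) (s : PySem.Set Int) (x : Int) (hb : 2 ≤ b) :
    x ∈ loopBOuter n b s ↔
      x ∈ s ∨ ∃ b', b ≤ b' ∧ b' * b' + b' + 1 ≤ n ∧ x ∈ genA n b' 3 := by
  fun_induction loopBOuter n b s with
  | case1 b s hle ih =>
    rw [ih (by omega), loopBInner_start n b s (by omega), mem_foldl_add_id]
    constructor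
    · rintro ((hx | hx) | ⟨b', hb', hle', hx⟩)
      · exact Or.inl hx
      · exact Or.inr ⟨b, le_refl _, hle, hx⟩
      · exact Or.inr ⟨b', by omega, hle', hx⟩
    · rintro (hx | ⟨b', hb', hle', hx⟩)
      · exact Or.inl (Or.inl hx)
      · rcases eq_or_lt_of_le hb' with rfl | hlt
        · exact Or.inl (Or.inr hx)
        · exact Or.inr ⟨b', by omega, hle', hx⟩
  | case2 b s hle =>
    simp only [iff_self_or]
    rintro ⟨b', hb', hle', -⟩
    have : b * b + b + 1 ≤ b' * b' + b' + 1 := by nlinarith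
    omega

theorem nodup_loopBOuter (n b : Int) (s : PySem.Set Int) (hs : s.Nodup) :
    (loopBOuter n b s).Nodup := by
  fun_induction loopBOuter n b s with
  | case1 b s hle ih => exact ih (nodup_loopBInner n b _ _ s hs)
  | case2 b s hle => exact hs

def listP (n : Int) : List Int :=
  (PySem.List.pyRange 2 (n + 1) 1).flatMap (fun b => genA n b 2)

theorem foldl_flatMap_fuse {α β γ : Type} (l : List α) (f : α → List β)
    (g : γ → β → γ) (init : γ) :
    l.foldl (fun acc a => (f a).foldl g acc) init = (l.flatMap f).foldl g init := by
  induction l generalizing init with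
  | nil => rfl
  | cons x t ih => simp [List.flatMap_cons, List.foldl_append, ih]

theorem dictA_eq_fold (n : Int) :
    (PySem.List.pyRange 2 (n + 1) 1).foldl (fun d base => loopA n base 2 d)
        (∅ : Std.HashMap Int Int) =
      (listP n).foldl (fun d x => d.insert x (d.getD x 0 + 1)) ∅ := by
  rw [listP, ← foldl_flatMap_fuse]
  exact PySem.List.foldl_congr_mem _ _ _ _ (fun d base _ => loopA_eq_foldl n base 2 d)

theorem getD_foldl_bump (l : List Int) (d : Std.HashMap Int Int) (k : Int) :
    (l.foldl (fun d x => d.insert x (d.getD x 0 + 1)) d).getD k 0 =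
      d.getD k 0 + (l.count k : Int) := by
  induction l generalizing d with
  | nil => simp
  | cons x t ih =>
    rw [List.foldl_cons, ih, Std.HashMap.getD_insert, List.count_cons]
    by_cases h : x = k
    · simp [h]; omega
    · simp [h]

theorem mem_foldl_bump (l : List Int) (d : Std.HashMap Int Int) (k : Int) :
    k ∈ l.foldl (fun d x => d.insert x (d.getD x 0 + 1)) d ↔ k ∈ d ∨ k ∈ l := by
  induction l generalizing d with
  | nil => simp
  | cons x t ih =>
    rw [List.foldl_cons, ih, Std.HashMap.mem_insert]
    simp only [beq_iff_eq, List.mem_cons]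
    tauto

theorem sum_map_ite_eq_countP {α : Type} (l : List α) (p : α → Bool) :
    (l.map (fun b => if p b then (1 : Nat) else 0)).sum = l.countP p := by
  induction l with
  | nil => rfl
  | cons x t ih => by_cases h : p x <;> simp [h, ih, Nat.add_comm]

theorem two_le_countP_iff (l : List Int) (p : Int → Bool) (hl : l.Pairwise (· < ·)) :
    2 ≤ l.countP p ↔ ∃ a ∈ l, ∃ c ∈ l, a < c ∧ p a ∧ p c := by
  induction l with
  | nil => simp
  | cons x t ih =>
    have hx : ∀ y ∈ t, x < y := fun y hy => (List.pairwise_cons.mp hl).1 y hy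
    rw [List.countP_cons]
    by_cases hpx : p x
    · simp only [hpx, if_pos]
      constructor
      · intro h
        obtain ⟨c, hc, hpc⟩ := List.countP_pos_iff.mp (show 0 < t.countP p by omega)
        exact ⟨x, by simp, c, by simp [hc], hx c hc, hpx, hpc⟩
      · rintro ⟨a, ha, c, hc, hac, hpa, hpc⟩
        rcases List.mem_cons.mp hc with rfl | hct
        · rcases List.mem_cons.mp ha with rfl | hat
          · omega
          · exact absurd (hx _ hat) (by omega)
        · have : 1 ≤ t.countP p := List.countP_pos_iff.mpr ⟨c, hct, hpc⟩
          omega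
    · simp only [hpx, if_neg, Bool.false_eq_true, not_false_iff, add_zero]
      rw [ih (List.pairwise_cons.mp hl).2]
      constructor
      · rintro ⟨a, ha, c, hc, h1, h2, h3⟩
        exact ⟨a, by simp [ha], c, by simp [hc], h1, h2, h3⟩
      · rintro ⟨a, ha, c, hc, h1, h2, h3⟩
        rcases List.mem_cons.mp ha with rfl | hat
        · exact absurd h2 (by simp [hpx])
        rcases List.mem_cons.mp hc with rfl | hct
        · exact absurd h3 (by simp [hpx])
        exact ⟨a, hat, c, hct, h1, h2, h3⟩

theorem count_listP (n x : Int) :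
    (listP n).count x =
      (PySem.List.pyRange 2 (n + 1) 1).countP (fun b => decide (x ∈ genA n b 2)) := by
  rw [listP, List.count_flatMap, ← sum_map_ite_eq_countP]
  congr 1
  refine List.map_congr_left (fun b hb => ?_)
  have hb2 : 2 ≤ b := (PySem.List.mem_pyRange_one.mp hb).1
  by_cases hx : x ∈ genA n b 2
  · simp only [Function.comp_apply, hx, decide_true, if_pos]
    exact List.count_eq_one_of_mem ((pairwise_genA n b 2 hb2 (by omega)).nodup) hx
  · simp only [Function.comp_apply, hx, decide_false]
    exact List.count_eq_zero_of_not_mem hx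

theorem main_iff (n x : Int) :
    2 ≤ (listP n).count x ↔
      ∃ b', 2 ≤ b' ∧ b' * b' + b' + 1 ≤ n ∧ x ∈ genA n b' 3 := by
  rw [count_listP, two_le_countP_iff _ _ (PySem.List.pairwise_lt_pyRange_one 2 (n + 1))]
  constructor
  · rintro ⟨a, ha, c, hc, hac, hpa, hpc⟩
    have ha2 : 2 ≤ a := (PySem.List.mem_pyRange_one.mp ha).1
    have hc2 : 2 ≤ c := (PySem.List.mem_pyRange_one.mp hc).1
    obtain ⟨r1, hr1, hx1, hxn⟩ := (mem_genA n a 2 x ha2 (by omega)).mp (of_decide_eq_true hpa)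
    obtain ⟨r2, hr2, hx2, -⟩ := (mem_genA n c 2 x hc2 (by omega)).mp (of_decide_eq_true hpc)
    by_cases h1 : 3 ≤ r1
    · refine ⟨a, ha2, ?_, (mem_genA n a 3 x ha2 (by omega)).mpr ⟨r1, h1, hx1, hxn⟩⟩
      have h3 : repunitA a 3 ≤ repunitA a r1 := repunitA_le_of_le a 3 r1 ha2 (by omega) h1
      rw [repunitA_three] at h3
      omega
    · have hr1' : r1 = 2 := by omega
      by_cases h2 : 3 ≤ r2
      · refine ⟨c, hc2, ?_, (mem_genA n c 3 x hc2 (by omega)).mpr ⟨r2, h2, hx2, hxn⟩⟩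
        have h3 : repunitA c 3 ≤ repunitA c r2 := repunitA_le_of_le c 3 r2 hc2 (by omega) h2
        rw [repunitA_three] at h3
        omega
      · have hr2' : r2 = 2 := by omega
        subst hr1' hr2'
        rw [repunitA_two] at hx1
        rw [repunitA_two] at hx2
        omega
  · rintro ⟨b', hb2, hle, hx⟩
    obtain ⟨r, hr3, hxv, hxn⟩ := (mem_genA n b' 3 x hb2 (by omega)).mp hx
    have hx3 : repunitA b' 3 ≤ x := by
      rw [hxv]; exact repunitA_le_of_le b' 3 r hb2 (by omega) hr3
    rw [repunitA_three] at hx3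
    have hsq : 4 ≤ b' * b' := by nlinarith
    refine ⟨b', PySem.List.mem_pyRange_one.mpr ⟨hb2, by omega⟩,
      x - 1, PySem.List.mem_pyRange_one.mpr ⟨by omega, by omega⟩, by omega, ?_, ?_⟩
    · exact decide_eq_true ((mem_genA n b' 2 x hb2 (by omega)).mpr ⟨r, by omega, hxv, hxn⟩)
    · refine decide_eq_true ((mem_genA n (x - 1) 2 x (by omega) (by omega)).mpr
        ⟨2, le_refl _, ?_, hxn⟩)
      rw [repunitA_two]
      omega

theorem getD_dictA (n k : Int) :
    ((listP n).foldl (fun d x => d.insert x (d.getD x 0 + 1))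
        (∅ : Std.HashMap Int Int)).getD k 0 = ((listP n).count k : Int) := by
  rw [getD_foldl_bump, Std.HashMap.getD_empty, zero_add]

theorem mem_filteredA (n a : Int) :
    (a ∈ ((((listP n).foldl (fun d x => d.insert x (d.getD x 0 + 1))
        (∅ : Std.HashMap Int Int)).toList.filter
          (fun p => decide (1 < p.2))).map (fun p => p.1)) ↔ 2 ≤ (listP n).count a) := by
  constructor
  · rintro hm
    obtain ⟨⟨a', v⟩, hp, rfl⟩ := List.mem_map.mp hm
    obtain ⟨htl, hv⟩ := List.mem_filter.mp hp
    have hget := Std.HashMap.mem_toList_iff_getElem?_eq_some.mp htl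
    have hgd : ((listP n).count a' : Int) = v := by
      rw [← getD_dictA n a', Std.HashMap.getD_eq_getD_getElem?, hget]; rfl
    have : (1 : Int) < v := of_decide_eq_true hv
    show 2 ≤ (listP n).count a'
    omega
  · intro hcnt
    set H := (listP n).foldl (fun d x => d.insert x (d.getD x 0 + 1))
      (∅ : Std.HashMap Int Int) with hH
    have hmemP : a ∈ listP n := List.count_pos_iff.mp (by omega)
    have hmemH : a ∈ H := by
      rw [hH, mem_foldl_bump]
      exact Or.inr hmemP
    have hsome : H[a]? = some (H.getD a 0) := by
      rw [Std.HashMap.getD_eq_getD_getElem?]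
      obtain ⟨v, hv⟩ := Option.isSome_iff_exists.mp
        (Std.HashMap.mem_iff_isSome_getElem?.mp hmemH)
      rw [hv]; rfl
    have hgd : H.getD a 0 = ((listP n).count a : Int) := getD_dictA n a
    refine List.mem_map.mpr ⟨(a, H.getD a 0), List.mem_filter.mpr ⟨?_, ?_⟩, rfl⟩
    · exact Std.HashMap.mem_toList_iff_getElem?_eq_some.mpr hsome
    · exact decide_eq_true (show (1 : Int) < H.getD a 0 by rw [hgd]; exact_mod_cast hcnt)

theorem nodup_filteredA (n : Int) :
    ((((listP n).foldl (fun d x => d.insert x (d.getD x 0 + 1))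
        (∅ : Std.HashMap Int Int)).toList.filter
          (fun p => decide (1 < p.2))).map (fun p => p.1)).Nodup := by
  set H := (listP n).foldl (fun d x => d.insert x (d.getD x 0 + 1))
    (∅ : Std.HashMap Int Int)
  have hkeys : (H.toList.map (fun p => p.1)).Nodup := by
    have := Std.HashMap.map_fst_toList_eq_keys (m := H)
    have hpw : H.keys.Pairwise (fun a b => (a == b) = false) := Std.HashMap.distinct_keys
    have : (H.toList.map Prod.fst).Pairwise (fun a b => a ≠ b) := by
      rw [this]
      exact hpw.imp (fun h => by simpa using h)
    exact this
  exact hkeys.sublist (List.Sublist.map _ List.filter_sublist)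

theorem f0_eq (n : Int) : f0 n = f0_alt n := by
  unfold f0 f0_alt
  simp only []
  congr 1
  rw [dictA_eq_fold]
  refine List.Perm.sum_eq ?_
  rw [List.perm_ext_iff_of_nodup (nodup_filteredA n)
    (nodup_loopBOuter n 2 PySem.Set.empty (by exact List.nodup_nil))]
  intro a
  rw [mem_filteredA, mem_loopBOuter n 2 PySem.Set.empty a (le_refl 2)]
  rw [main_iff]
  constructor
  · rintro ⟨b', h1, h2, h3⟩
    exact Or.inr ⟨b', h1, h2, h3⟩
  · rintro (hmem | ⟨b', h1, h2, h3⟩)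
    · exact absurd hmem (List.not_mem_nil)
    · exact ⟨b', h1, h2, h3⟩

-- ===== VERDICT (by name: the statement is the Claim_ definition above) =====
theorem f0_spec : Claim_equal_f0 := by
  intro n _
  exact f0_eq n
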